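-- pv_equiv track=rewrite | github.com/tomorrowdevs-projects/programming-basics | projects/m4/007-weird-words/solutions/enricozoboli/solution_weird_words.py | find_rule_followers
-- ===== SOURCE A (Python) =====
-- def find_rule_followers(words_lst):
--     """
--     Takes a list of words and return two lists. One of the lists
--     contains only words following the rule “I before E except after C”.
--     The other list contains only the exception of the rule.
--     Parameter:
--         - A list
--     Return:
--         - Two lists
--     """
--     rule_followers = []
--     rule_not_followers = []
--     for word in words_lst:
--         if ('cei' in word or 'ie' in word) and word not in rule_followers:
--             rule_followers.append(word)
--         elif 'ei' in word and word not in rule_not_followers: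
--             rule_not_followers.append(word)
--     return rule_followers, rule_not_followers
-- ===== SOURCE B (Python) =====
-- def find_rule_followers(words_lst):
--     unique = list(dict.fromkeys(words_lst))
--     followers = [w for w in unique if 'cei' in w or 'ie' in w]
--     non_followers = [w for w in unique if 'ei' in w and not ('cei' in w or 'ie' in w)]
--     return followers, non_followers
-- ===== Notes on version B (the rewrite author's own statement) =====
-- stated objective: simpler
-- what changed: One ordered dedup pass (dict.fromkeys) followed by two independent filter comprehensions, instead of A's single interleaved loop with per-list membership dedup.
-- intended difference: On lists where some word containing 'ei' and also ('cei' or 'ie') occurs at least twice, A puts that word into BOTH lists (the duplicate occurrence re-enters via the elif since the word already sits in rule_followers), while B lists it only among the followers, which is the intended disjoint classification. — e.g. on find_rule_followers(["ceiling", "ceiling"]): A returns (["ceiling"], ["ceiling"]), B returns (["ceiling"], [])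
import Mathlib
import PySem

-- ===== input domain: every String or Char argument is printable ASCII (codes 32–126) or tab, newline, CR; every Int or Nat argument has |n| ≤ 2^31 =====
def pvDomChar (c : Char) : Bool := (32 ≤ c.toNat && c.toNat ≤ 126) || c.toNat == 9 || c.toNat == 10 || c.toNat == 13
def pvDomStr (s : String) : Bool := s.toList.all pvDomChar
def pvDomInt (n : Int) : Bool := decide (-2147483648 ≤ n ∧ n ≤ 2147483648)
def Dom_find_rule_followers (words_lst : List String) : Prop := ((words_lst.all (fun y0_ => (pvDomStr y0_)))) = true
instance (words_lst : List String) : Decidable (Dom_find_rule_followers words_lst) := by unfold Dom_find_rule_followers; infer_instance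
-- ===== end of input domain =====

-- B replaces A's single interleaved loop (per-list membership dedup) by one ordered
-- dedup pass followed by two independent filters (objective: simpler).

-- shared predicates: 'cei' in w or 'ie' in w  /  'ei' in w
def hasRule (w : String) : Bool := PySem.Str.isIn "cei" w || PySem.Str.isIn "ie" w
def hasEI (w : String) : Bool := PySem.Str.isIn "ei" w

-- ===== PORT A =====
def stepA (st : List String × List String) (word : String) : List String × List String :=
  if hasRule word && !(st.1.contains word) then (st.1 ++ [word], st.2)
  else if hasEI word && !(st.2.contains word) then (st.1, st.2 ++ [word])
  else st

def find_rule_followers (words_lst : List String) : List String × List String :=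
  words_lst.foldl stepA ([], [])

-- ===== PORT B =====
def find_rule_followers_alt (words_lst : List String) : List String × List String :=
  let unique := PySem.List.dedup words_lst
  (unique.filter (fun w => hasRule w),
   unique.filter (fun w => hasEI w && !hasRule w))

-- ===== PRECONDITION & SPEC =====
-- On lists where some word containing 'ei' and also ('cei' or 'ie') occurs at least twice,
-- A puts that word into BOTH lists (its duplicate occurrence re-enters via the elif because
-- the word already sits in rule_followers), while B lists it only among the followers,
-- which is the intended disjoint classification.
def D_find_rule_followers (words_lst : List String) : Prop :=
  ∃ w ∈ words_lst, 2 ≤ words_lst.count w ∧ hasRule w = true ∧ hasEI w = true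
instance (words_lst : List String) : Decidable (D_find_rule_followers words_lst) := by
  unfold D_find_rule_followers; infer_instance

def Spec_find_rule_followers (words_lst : List String) (out : List String × List String) : Prop :=
  ¬ D_find_rule_followers words_lst → out = find_rule_followers_alt words_lst
instance (words_lst : List String) (out : List String × List String) : Decidable (Spec_find_rule_followers words_lst out) := by
  unfold Spec_find_rule_followers; infer_instance

def pvDiffWitness_find_rule_followers : List String := ["ceiling", "ceiling"]
def pvDiffWitnessOut_find_rule_followers : (List String × List String) × (List String × List String) :=
  ((["ceiling"], ["ceiling"]), (["ceiling"], []))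

-- ===== CLAIM (what is proved, stated in full; the proofs are below) =====
def Claim_unchanged_find_rule_followers : Prop := ∀ (words_lst : List String), Dom_find_rule_followers words_lst → Spec_find_rule_followers words_lst (find_rule_followers words_lst)
def Claim_changed_find_rule_followers : Prop := Dom_find_rule_followers (pvDiffWitness_find_rule_followers) ∧ D_find_rule_followers (pvDiffWitness_find_rule_followers) ∧ find_rule_followers (pvDiffWitness_find_rule_followers) = pvDiffWitnessOut_find_rule_followers.1 ∧ find_rule_followers_alt (pvDiffWitness_find_rule_followers) = pvDiffWitnessOut_find_rule_followers.2 ∧ pvDiffWitnessOut_find_rule_followers.1 ≠ pvDiffWitnessOut_find_rule_followers.2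
def Claim_exact_find_rule_followers : Prop := ∀ (words_lst : List String), Dom_find_rule_followers words_lst → D_find_rule_followers words_lst → find_rule_followers words_lst ≠ find_rule_followers_alt words_lst

-- ===== LEMMAS AND PROOFS =====

-- filter commutes with ordered-dedup accumulation
lemma filter_update (p : String → Bool) (l s : List String) :
    (PySem.Set.update s l).filter p = PySem.Set.update (s.filter p) (l.filter p) := by
  induction l generalizing s with
  | nil => simp [PySem.Set.update]
  | cons a l ih =>
      have hupd : ∀ (t : List String) (x : String) (r : List String),
          PySem.Set.update t (x :: r) = PySem.Set.update (PySem.Set.add t x) r := by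
        intro t x r; simp [PySem.Set.update]
      by_cases hp : p a = true
      · rw [List.filter_cons_of_pos hp, hupd, hupd, ih]
        congr 1
        by_cases hm : a ∈ s
        · simp [PySem.Set.add, hm, List.mem_filter, hp]
        · simp [PySem.Set.add, hm, List.mem_filter, hp, List.filter_append,
            List.filter_cons_of_pos hp]
      · rw [List.filter_cons_of_neg (by simpa using hp), hupd, ih]
        congr 1
        by_cases hm : a ∈ s
        · simp [PySem.Set.add, hm]
        · simp [PySem.Set.add, hm, List.filter_append, hp]

-- the loop of A, under the no-bad-duplicate hypothesis, is two independent dedup-filters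
lemma loopA_eq (l rf rnf : List String)
    (H : ∀ w ∈ l, hasRule w = true → hasEI w = true → w ∉ rf ∧ l.count w ≤ 1) :
    l.foldl stepA (rf, rnf) =
      (PySem.Set.update rf (l.filter hasRule),
       PySem.Set.update rnf (l.filter (fun w => hasEI w && !hasRule w))) := by
  induction l generalizing rf rnf with
  | nil => simp [PySem.Set.update]
  | cons a l ih =>
      have hupd : ∀ (t : List String) (x : String) (r : List String),
          PySem.Set.update t (x :: r) = PySem.Set.update (PySem.Set.add t x) r := by
        intro t x r; simp [PySem.Set.update]
      by_cases hF : hasRule a = true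
      · by_cases hm : a ∈ rf
        · -- a already a follower: if also hasEI, H is violated; so hasEI a = false and nothing happens
          have hE : hasEI a = false := by
            by_contra h
            exact (H a (by simp) hF (by simpa using h)).1 hm
          have hstep : stepA (rf, rnf) a = (rf, rnf) := by
            simp [stepA, hF, hE, hm]
          rw [List.foldl_cons, hstep,
            List.filter_cons_of_pos hF,
            List.filter_cons_of_neg (by simp [hE]), hupd]
          have hadd : PySem.Set.add rf a = rf := by simp [PySem.Set.add, hm]
          rw [hadd, ih]
          intro w hw h1 h2
          obtain ⟨hrf, hc⟩ := H w (by simp [hw]) h1 h2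
          exact ⟨hrf, le_trans (List.count_le_count_cons ..) hc⟩
        · -- fresh follower
          have hstep : stepA (rf, rnf) a = (rf ++ [a], rnf) := by
            simp [stepA, hF, hm]
          rw [List.foldl_cons, hstep,
            List.filter_cons_of_pos hF,
            List.filter_cons_of_neg (by simp [hF]), hupd]
          have hadd : PySem.Set.add rf a = rf ++ [a] := by simp [PySem.Set.add, hm]
          rw [hadd, ih]
          intro w hw h1 h2
          obtain ⟨hrf, hc⟩ := H w (by simp [hw]) h1 h2
          constructor
          · intro hmem
            rcases List.mem_append.1 hmem with h | h
            · exact hrf h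
            · -- w = a : then a occurs twice in a :: l, contradicting count ≤ 1
              have hwa : w = a := by simpa using h
              subst hwa
              have : 2 ≤ (w :: l).count w := by
                have : 1 ≤ l.count w := List.count_pos_iff.2 hw
                simp [List.count_cons_self]; omega
              omega
          · exact le_trans (List.count_le_count_cons ..) hc
      · -- not a follower word
        by_cases hE : hasEI a = true
        · by_cases hm : a ∈ rnf
          · have hstep : stepA (rf, rnf) a = (rf, rnf) := by
              simp [stepA, hF, hE, hm]
            rw [List.foldl_cons, hstep,
              List.filter_cons_of_neg (by simp [hF]),
              List.filter_cons_of_pos (by simp [hE, hF]), hupd]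
            have hadd : PySem.Set.add rnf a = rnf := by simp [PySem.Set.add, hm]
            rw [hadd, ih]
            intro w hw h1 h2
            obtain ⟨hrf, hc⟩ := H w (by simp [hw]) h1 h2
            exact ⟨hrf, le_trans (List.count_le_count_cons ..) hc⟩
          · have hstep : stepA (rf, rnf) a = (rf, rnf ++ [a]) := by
              simp [stepA, hF, hE, hm]
            rw [List.foldl_cons, hstep,
              List.filter_cons_of_neg (by simp [hF]),
              List.filter_cons_of_pos (by simp [hE, hF]), hupd]
            have hadd : PySem.Set.add rnf a = rnf ++ [a] := by simp [PySem.Set.add, hm]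
            rw [hadd, ih]
            intro w hw h1 h2
            obtain ⟨hrf, hc⟩ := H w (by simp [hw]) h1 h2
            exact ⟨hrf, le_trans (List.count_le_count_cons ..) hc⟩
        · have hstep : stepA (rf, rnf) a = (rf, rnf) := by
            simp [stepA, hF, hE]
          rw [List.foldl_cons, hstep,
            List.filter_cons_of_neg (by simp [hF]),
            List.filter_cons_of_neg (by simp [hE]), ih]
          intro w hw h1 h2
          obtain ⟨hrf, hc⟩ := H w (by simp [hw]) h1 h2
          exact ⟨hrf, le_trans (List.count_le_count_cons ..) hc⟩

-- A-side for the tight claim: a duplicated follower word with 'ei' lands in the second list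
lemma snd_subset_stepA (st : List String × List String) (a : String) (w : String)
    (h : w ∈ st.2) : w ∈ (stepA st a).2 := by
  unfold stepA; split_ifs <;> simp_all

lemma fst_subset_stepA (st : List String × List String) (a : String) (w : String)
    (h : w ∈ st.1) : w ∈ (stepA st a).1 := by
  unfold stepA; split_ifs <;> simp_all

lemma mem_snd_loopA (l : List String) (st : List String × List String) (w : String)
    (hF : hasRule w = true) (hE : hasEI w = true)
    (h : 2 ≤ l.count w ∨ (1 ≤ l.count w ∧ w ∈ st.1) ∨ w ∈ st.2) :
    w ∈ (l.foldl stepA st).2 := by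
  induction l generalizing st with
  | nil =>
      rcases h with h | h | h
      · simp at h
      · simp at h
      · simpa using h
  | cons a l ih =>
      rw [List.foldl_cons]
      apply ih
      by_cases haw : a = w
      · subst haw
        -- stepA puts a into .1 (if fresh) or, if already in .1, into .2
        by_cases hm1 : a ∈ st.1
        · -- elif fires (or a already in .2): a ∈ (stepA st a).2
          have : a ∈ (stepA st a).2 := by
            unfold stepA
            by_cases hm2 : a ∈ st.2
            · split_ifs <;> simp_all
            · simp [hF, hE, hm1, hm2]
          exact Or.inr (Or.inr this)
        · rcases h with h | h | h
          · -- count (a::l) ≥ 2 → count l ≥ 1, and a goes into .1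
            have hc : 1 ≤ l.count a := by rw [List.count_cons_self] at h; omega
            have : a ∈ (stepA st a).1 := by
              simp [stepA, hF, hm1]
            exact Or.inr (Or.inl ⟨hc, this⟩)
          · exact absurd h.2 hm1
          · exact Or.inr (Or.inr (snd_subset_stepA st a a h))
      · have hcl : (a :: l).count w = l.count w := by
          simp [haw]
        rcases h with h | ⟨h1, h2⟩ | h
        · exact Or.inl (by rwa [hcl] at h)
        · exact Or.inr (Or.inl ⟨by rwa [hcl] at h1, fst_subset_stepA st a w h2⟩)
        · exact Or.inr (Or.inr (snd_subset_stepA st a w h))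

-- ===== VERDICT (by name: the statement is the Claim_ definition above) =====
theorem find_rule_followers_spec : Claim_unchanged_find_rule_followers := by
  intro l _ hnd
  have H : ∀ w ∈ l, hasRule w = true → hasEI w = true → w ∉ ([] : List String) ∧ l.count w ≤ 1 := by
    intro w hw h1 h2
    refine ⟨by simp, ?_⟩
    by_contra hc
    exact hnd ⟨w, hw, by omega, h1, h2⟩
  have hA := loopA_eq l [] [] H
  have hofl : ∀ (r : List String), PySem.Set.update ([] : List String) r = PySem.Set.ofList r := by
    intro r; simp [PySem.Set.update, PySem.Set.ofList_eq_foldl]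
  have hB : find_rule_followers_alt l =
      (PySem.Set.update ([] : List String) (l.filter hasRule),
       PySem.Set.update ([] : List String) (l.filter (fun w => hasEI w && !hasRule w))) := by
    unfold find_rule_followers_alt
    simp only [PySem.List.dedup_eq_ofList, ← hofl l, filter_update]
    simp
  unfold find_rule_followers
  rw [hA, hB]

theorem find_rule_followers_changed : Claim_changed_find_rule_followers := by
  unfold Claim_changed_find_rule_followers; decide

theorem find_rule_followers_tight : Claim_exact_find_rule_followers := by
  intro l _ hD heq
  obtain ⟨w, hw, hc, hF, hE⟩ := hD
  have hA2 : w ∈ (find_rule_followers l).2 :=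
    mem_snd_loopA l ([], []) w hF hE (Or.inl hc)
  have hB2 : w ∉ (find_rule_followers_alt l).2 := by
    unfold find_rule_followers_alt
    simp [List.mem_filter, hF]
  rw [heq] at hA2
  exact hB2 hA2
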